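-- pv_equiv track=rewrite | github.com/RAJUS248/Data-Structure-and-Algorithms | 01_Array or List/57_Move all negative elements to end.py | segregateElements
-- ===== SOURCE A (Python) =====
-- def segregateElements(arr):
--     pos = []
--     neg = []
--
--     for num in arr:
--         if num >= 0:
--             pos.append(num)
--
--         else:
--             neg.append(num)
--
--     res = pos + neg
--
--     for i in range(len(arr)):
--         arr[i] = res[i]
--
--     return arr
-- ===== SOURCE B (Python) =====
-- def segregateElements(arr):
--     arr.sort(key=lambda x: x < 0)
--     return arr
-- ===== Notes on version B (the rewrite author's own statement) =====
-- stated objective: idiomatic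
-- what changed: Replaces the two-bucket partition plus copy-back loop with a single in-place stable sort keyed on the sign (key=lambda x: x < 0), whose stability preserves the relative order of non-negatives and of negatives.
import Mathlib
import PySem

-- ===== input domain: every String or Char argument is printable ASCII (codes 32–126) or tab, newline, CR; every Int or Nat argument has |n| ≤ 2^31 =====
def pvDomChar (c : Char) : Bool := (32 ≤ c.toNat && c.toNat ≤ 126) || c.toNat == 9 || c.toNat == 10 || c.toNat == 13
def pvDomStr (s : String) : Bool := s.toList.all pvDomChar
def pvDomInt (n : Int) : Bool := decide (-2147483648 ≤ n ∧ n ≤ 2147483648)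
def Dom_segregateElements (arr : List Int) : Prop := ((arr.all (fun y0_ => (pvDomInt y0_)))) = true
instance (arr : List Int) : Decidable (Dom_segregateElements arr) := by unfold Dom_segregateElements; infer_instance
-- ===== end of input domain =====

-- B replaces A's two-bucket partition + copy-back loop by a single in-place stable sort
-- keyed on the sign (idiomatic); both A and B mutate the argument list in place in Python
-- (the same mutation), and the equivalence proved here is about the return value.

-- ===== PORT A =====
def segregateElements (arr : List Int) : List Int :=
  let pn : List Int × List Int :=
    arr.foldl (fun pn num =>
      if num ≥ 0 then (pn.1 ++ [num], pn.2) else (pn.1, pn.2 ++ [num])) ([], [])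
  let res := pn.1 ++ pn.2
  -- for i in range(len(arr)): arr[i] = res[i]
  (PySem.List.pyRange 0 (arr.length : Int) 1).foldl
    (fun a i => match PySem.List.pyGet? res i with
      | some v => a.set i.toNat v
      | none => a) arr

-- ===== PORT B =====
def segregateElements_alt (arr : List Int) : List Int :=
  PySem.List.sorted arr (fun x => decide (x < 0))

-- ===== PRECONDITION & SPEC =====
def Spec_segregateElements (arr : List Int) (out : List Int) : Prop := out = segregateElements_alt arr
instance (arr : List Int) (out : List Int) : Decidable (Spec_segregateElements arr out) := by unfold Spec_segregateElements; infer_instance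

-- ===== CLAIM (what is proved, stated in full; the proofs are below) =====
def Claim_equal_segregateElements : Prop := ∀ (arr : List Int), Dom_segregateElements arr → Spec_segregateElements arr (segregateElements arr)

-- ===== LEMMAS AND PROOFS =====

-- A's partition loop: appends each element to pos or neg, keeping order.
theorem partition_foldl (xs : List Int) (P N : List Int) :
    xs.foldl (fun (pn : List Int × List Int) num =>
      if num ≥ 0 then (pn.1 ++ [num], pn.2) else (pn.1, pn.2 ++ [num])) (P, N)
    = (P ++ xs.filter (fun x => decide (0 ≤ x)), N ++ xs.filter (fun x => decide (x < 0))) := by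
  induction xs generalizing P N with
  | nil => simp
  | cons x t ih =>
    by_cases hx : x ≥ 0
    · simp [hx, ih, not_lt.mpr hx]
    · simp [hx, ih, lt_of_not_ge hx]

-- Inserting into a list that is "non-negatives then negatives" keeps that shape.
theorem insertBy_partition (x : Int) (P N : List Int)
    (hP : ∀ y ∈ P, decide (y < 0) = false) (hN : ∀ y ∈ N, decide (y < 0) = true) :
    PySem.List.insertBy (fun a b => decide ((decide (a < 0)) < (decide (b < 0)))) x (P ++ N)
    = if 0 ≤ x then P ++ x :: N else P ++ N ++ [x] := by
  by_cases hx : 0 ≤ x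
  · have hkx : decide (x < 0) = false := by simp [not_lt.mpr hx]
    simp only [hx, if_true]
    induction P with
    | nil =>
      cases N with
      | nil => simp [PySem.List.insertBy]
      | cons y t =>
        have hy := hN y (by simp)
        simp [PySem.List.insertBy, hkx, hy]
    | cons p Pt ih =>
      have hp := hP p (by simp)
      have := ih (fun y hy => hP y (by simp [hy]))
      simp [PySem.List.insertBy, hkx, hp, this]
  · rw [if_neg hx]
    apply PySem.List.insertBy_of_forall_not_before
    intro y hy
    have hkx : decide (x < 0) = true := by simp [lt_of_not_ge hx]
    rcases List.mem_append.mp hy with h | h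
    · simp [hkx, hP y h, Bool.lt_iff]
    · simp [hkx, hN y h]

-- The insertion-sort fold with the sign key builds exactly the partition.
theorem foldl_insertBy_partition (xs : List Int) (P N : List Int)
    (hP : ∀ y ∈ P, decide (y < 0) = false) (hN : ∀ y ∈ N, decide (y < 0) = true) :
    xs.foldl (fun acc x =>
      PySem.List.insertBy (fun a b => decide ((decide (a < 0)) < (decide (b < 0)))) x acc) (P ++ N)
    = (P ++ xs.filter (fun x => decide (0 ≤ x))) ++ (N ++ xs.filter (fun x => decide (x < 0))) := by
  induction xs generalizing P N with
  | nil => simp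
  | cons x t ih =>
    rw [List.foldl_cons, insertBy_partition x P N hP hN]
    by_cases hx : 0 ≤ x
    · have hkx : decide (x < 0) = false := by simp [not_lt.mpr hx]
      rw [if_pos hx]
      have hsh : P ++ x :: N = (P ++ [x]) ++ N := by simp
      have hP' : ∀ y ∈ P ++ [x], decide (y < 0) = false := by
        intro y hy
        rcases List.mem_append.mp hy with h | h
        · exact hP y h
        · simp at h; subst h; exact hkx
      rw [hsh, ih (P ++ [x]) N hP' hN]
      simp [hx, not_lt.mpr hx]
    · have hxlt : x < 0 := lt_of_not_ge hx
      have hN' : ∀ y ∈ N ++ [x], decide (y < 0) = true := by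
        intro y hy
        rcases List.mem_append.mp hy with h | h
        · exact hN y h
        · simp at h; subst h; simp [hxlt]
      rw [if_neg hx, List.append_assoc, ih P (N ++ [x]) hP hN']
      simp [hxlt, hx]

-- B computes positives-then-negatives, each group in original order.
theorem alt_eq_partition (arr : List Int) :
    segregateElements_alt arr
    = arr.filter (fun x => decide (0 ≤ x)) ++ arr.filter (fun x => decide (x < 0)) := by
  unfold segregateElements_alt
  rw [PySem.List.sorted_eq_foldl_insertBy]
  have := foldl_insertBy_partition arr [] [] (by simp) (by simp)
  simpa using this

-- The copy-back loop: writing res[i] into slot i for i = k … n-1 yields res.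
theorem copy_loop (res a : List Int) (h : res.length = a.length) :
    ∀ k : Nat, k ≤ a.length →
    (PySem.List.pyRange (k : Int) (a.length : Int) 1).foldl
      (fun b i => match PySem.List.pyGet? res i with
        | some v => b.set i.toNat v
        | none => b) (res.take k ++ a.drop k) = res := by
  intro k hk
  induction hn : a.length - k generalizing k with
  | zero =>
    have hek : k = a.length := by omega
    subst hek
    rw [PySem.List.pyRange]
    simp [h]
  | succ m ih =>
    have hlt : k < a.length := by omega
    rw [PySem.List.pyRange_one_cons (by exact_mod_cast hlt)]
    rw [List.foldl_cons]
    have hkr : k < res.length := by omega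
    have hget : PySem.List.pyGet? res (k : Int) = some (res[k]) := by
      rw [PySem.List.pyGet?_natCast res k, List.getElem?_eq_getElem hkr]
    have htkl : (res.take k).length = k := by
      simp [Nat.min_eq_left (le_of_lt hkr)]
    have hstep : (res.take k ++ a.drop k).set ((k : Int)).toNat (res[k])
        = res.take (k + 1) ++ a.drop (k + 1) := by
      have htn : ((k : Int)).toNat = k := by simp
      rw [htn, List.set_eq_take_append_cons_drop]
      have hlen : (res.take k ++ a.drop k).length = a.length := by
        simp [htkl]; omega
      rw [if_pos (by omega)]
      have h1 : (res.take k ++ a.drop k).take k = res.take k := List.take_left' htkl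
      have h2 : (res.take k ++ a.drop k).drop (k + 1) = a.drop (k + 1) := by
        rw [List.drop_append, htkl, List.drop_of_length_le (by omega : (res.take k).length ≤ k + 1)]
        rw [List.nil_append, List.drop_drop]
        congr 1
        omega
      rw [h1, h2]
      have hts : res.take (k + 1) = res.take k ++ [res[k]] := by
        rw [List.take_add_one, List.getElem?_eq_getElem hkr]
        rfl
      rw [hts, List.append_assoc]
      rfl
    rw [hget,
      show (match some (res[k]) with
        | some v => (res.take k ++ a.drop k).set ((k : Int)).toNat v
        | none => res.take k ++ a.drop k) = (res.take k ++ a.drop k).set ((k : Int)).toNat (res[k]) from rfl,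
      hstep]
    have hcast : ((k : Int) + 1) = ((k + 1 : Nat) : Int) := by push_cast; ring
    rw [hcast]
    exact ih (k + 1) (by omega) (by omega)

theorem a_eq_partition (arr : List Int) :
    segregateElements arr
    = arr.filter (fun x => decide (0 ≤ x)) ++ arr.filter (fun x => decide (x < 0)) := by
  unfold segregateElements
  rw [partition_foldl arr [] []]
  simp only [List.nil_append]
  set res := arr.filter (fun x => decide (0 ≤ x)) ++ arr.filter (fun x => decide (x < 0)) with hres
  have hperm : res.Perm arr := by
    rw [hres]
    have hp := List.filter_append_perm (fun x => decide (0 ≤ x)) arr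
    have hfc : arr.filter (fun x => decide (x < 0)) = arr.filter (fun x => !decide (0 ≤ x)) := by
      apply List.filter_congr
      intro x _
      by_cases h : 0 ≤ x
      · simp [h, not_lt.mpr h]
      · simp [h, lt_of_not_ge h]
    rw [hfc]
    exact hp
  have hlen : res.length = arr.length := hperm.length_eq
  have := copy_loop res arr hlen 0 (Nat.zero_le _)
  simpa using this

-- ===== VERDICT (by name: the statement is the Claim_ definition above) =====
theorem segregateElements_spec : Claim_equal_segregateElements := by
  intro arr _
  unfold Spec_segregateElements
  rw [a_eq_partition, alt_eq_partition]
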